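-- pv_equiv track=rewrite | github.com/ReDAndFel/AppMultiplicacionNumerosGrandes | algoritmos/AmericanoRecursivoEstatico.py | actualizar_resultado
-- ===== SOURCE A (Python) =====
-- def actualizar_resultado(resultado, k=None):
--     if k is None:
--         k = len(resultado) - 1
--
--     if k > 0:
--         resultado[k-1] += resultado[k] // 10
--         resultado[k] %= 10
--         actualizar_resultado(resultado, k-1)
--
--     return resultado
-- ===== SOURCE B (Python) =====
-- def actualizar_resultado(resultado, k=None):
--     if k is None:
--         k = len(resultado) - 1
--     for i in range(k, 0, -1):
--         resultado[i - 1] += resultado[i] // 10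
--         resultado[i] %= 10
--     return resultado
-- ===== Notes on version B (the rewrite author's own statement) =====
-- stated objective: simpler
-- what changed: Replaces the tail recursion with an explicit descending for-loop over range(k, 0, -1), mutating the list in place with no recursive calls.
import Mathlib
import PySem

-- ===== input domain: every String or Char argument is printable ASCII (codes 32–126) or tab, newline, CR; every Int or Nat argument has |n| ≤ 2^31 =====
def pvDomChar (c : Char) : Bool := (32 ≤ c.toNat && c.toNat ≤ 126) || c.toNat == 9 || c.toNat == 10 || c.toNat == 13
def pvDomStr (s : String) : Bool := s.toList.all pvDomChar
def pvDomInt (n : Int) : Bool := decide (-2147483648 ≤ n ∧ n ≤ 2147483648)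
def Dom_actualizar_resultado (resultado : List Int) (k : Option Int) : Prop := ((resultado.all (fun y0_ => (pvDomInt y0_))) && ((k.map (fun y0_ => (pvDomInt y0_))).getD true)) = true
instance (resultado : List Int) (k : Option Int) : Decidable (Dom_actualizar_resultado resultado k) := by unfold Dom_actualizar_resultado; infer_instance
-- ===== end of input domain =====

-- B replaces A's tail recursion by a descending for-loop (same in-place mutation of the
-- argument in Python; return values proved equal here). Objective: simpler, O(1) stack.

-- ===== PORT A =====
-- recursion on k; terminates because (k-1).toNat < k.toNat when k > 0
def actualizar_resultado_go (resultado : List Int) (k : Int) : List Int :=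
  if h : k > 0 then
    let r1 := PySem.List.pySetD resultado (k - 1)
      (PySem.List.pyGetD resultado (k - 1) 0 +
        PySem.Int.floordiv (PySem.List.pyGetD resultado k 0) 10)
    let r2 := PySem.List.pySetD r1 k (PySem.Int.mod (PySem.List.pyGetD r1 k 0) 10)
    actualizar_resultado_go r2 (k - 1)
  else
    resultado
termination_by k.toNat
decreasing_by omega

def actualizar_resultado (resultado : List Int) (k : Option Int) : List Int :=
  match k with
  | none => actualizar_resultado_go resultado ((resultado.length : Int) - 1)
  | some i => actualizar_resultado_go resultado i

-- ===== PORT B =====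
def actualizar_resultado_alt (resultado : List Int) (k : Option Int) : List Int :=
  let k0 : Int := k.getD ((resultado.length : Int) - 1)
  (PySem.List.pyRange k0 0 (-1)).foldl
    (fun r i =>
      let r1 := PySem.List.pySetD r (i - 1)
        (PySem.List.pyGetD r (i - 1) 0 +
          PySem.Int.floordiv (PySem.List.pyGetD r i 0) 10)
      PySem.List.pySetD r1 i (PySem.Int.mod (PySem.List.pyGetD r1 i 0) 10))
    resultado

-- ===== PRECONDITION & SPEC =====
-- Pre_ excludes only inputs where Python A raises IndexError: an explicit k with
-- 0 < k and k ≥ len(resultado) (the access resultado[k] is out of range).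
def Pre_actualizar_resultado (resultado : List Int) (k : Option Int) : Prop :=
  ∀ i, k = some i → (i ≤ 0 ∨ i < (resultado.length : Int))

instance (resultado : List Int) (k : Option Int) : Decidable (Pre_actualizar_resultado resultado k) := by
  unfold Pre_actualizar_resultado; infer_instance

def pvWitness_actualizar_resultado : List Int × Option Int := ([12, 34, 567], none)

def Spec_actualizar_resultado (resultado : List Int) (k : Option Int) (out : List Int) : Prop := out = actualizar_resultado_alt resultado k
instance (resultado : List Int) (k : Option Int) (out : List Int) : Decidable (Spec_actualizar_resultado resultado k out) := by unfold Spec_actualizar_resultado; infer_instance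

-- ===== CLAIM (what is proved, stated in full; the proofs are below) =====
def Claim_equal_actualizar_resultado : Prop := ∀ (resultado : List Int) (k : Option Int), Dom_actualizar_resultado resultado k → Pre_actualizar_resultado resultado k → Spec_actualizar_resultado resultado k (actualizar_resultado resultado k)

-- ===== LEMMAS AND PROOFS =====
-- A's recursion equals B's fold over range(k, 0, -1), for every k and list.
theorem go_eq_foldl (n : Nat) : ∀ (resultado : List Int) (k : Int), k.toNat = n →
    actualizar_resultado_go resultado k =
      (PySem.List.pyRange k 0 (-1)).foldl
        (fun r i =>
          let r1 := PySem.List.pySetD r (i - 1)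
            (PySem.List.pyGetD r (i - 1) 0 +
              PySem.Int.floordiv (PySem.List.pyGetD r i 0) 10)
          PySem.List.pySetD r1 i (PySem.Int.mod (PySem.List.pyGetD r1 i 0) 10))
        resultado := by
  induction n with
  | zero =>
    intro resultado k hk
    have hle : k ≤ 0 := by omega
    rw [PySem.List.pyRange_neg_one_eq_nil hle]
    unfold actualizar_resultado_go
    simp [show ¬ k > 0 by omega]
  | succ m ih =>
    intro resultado k hk
    have hpos : 0 < k := by omega
    rw [PySem.List.pyRange_neg_one_cons hpos]
    unfold actualizar_resultado_go
    simp only [hpos, dite_true, List.foldl_cons]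
    exact ih _ (k - 1) (by omega)

-- ===== VERDICT (by name: the statement is the Claim_ definition above) =====
theorem actualizar_resultado_spec : Claim_equal_actualizar_resultado := by
  intro resultado k _ _
  unfold Spec_actualizar_resultado actualizar_resultado actualizar_resultado_alt
  cases k with
  | none => exact go_eq_foldl _ _ _ rfl
  | some i => exact go_eq_foldl _ _ _ rfl
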